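-- pv_equiv track=rewrite | github.com/Sixtaan/Simpl-IA | Simpl-IA.py | near_corner
-- ===== SOURCE A (Python) =====
-- CORNER_TOL = 10                                             # px – sensibilité détection coins pour le redimensionnement
--
-- def near_corner(x, y, box):
--     """Renvoie le coin près du point (None si éloigné)"""
--     x1, y1, x2, y2 = box
--     corners = {
--         'tl': (x1, y1),
--         'tr': (x2, y1),
--         'bl': (x1, y2),
--         'br': (x2, y2),
--     }
--     for name, (cx, cy) in corners.items():
--         if abs(x - cx) < CORNER_TOL and abs(y - cy) < CORNER_TOL:
--             return name
--     return None
-- ===== SOURCE B (Python) =====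
-- CORNER_TOL = 10
--
--
-- def near_corner(x, y, box):
--     """Resolve each axis independently and compose the corner name."""
--     x1, y1, x2, y2 = box
--     h = 'l' if abs(x - x1) < CORNER_TOL else 'r' if abs(x - x2) < CORNER_TOL else None
--     v = 't' if abs(y - y1) < CORNER_TOL else 'b' if abs(y - y2) < CORNER_TOL else None
--     if h is None or v is None:
--         return None
--     return v + h
-- ===== Notes on version B (the rewrite author's own statement) =====
-- stated objective: simpler
-- what changed: B resolves each axis independently (left/right edge, top/bottom edge) and composes the corner name, instead of scanning a dict of four corner points.
import Mathlib
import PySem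

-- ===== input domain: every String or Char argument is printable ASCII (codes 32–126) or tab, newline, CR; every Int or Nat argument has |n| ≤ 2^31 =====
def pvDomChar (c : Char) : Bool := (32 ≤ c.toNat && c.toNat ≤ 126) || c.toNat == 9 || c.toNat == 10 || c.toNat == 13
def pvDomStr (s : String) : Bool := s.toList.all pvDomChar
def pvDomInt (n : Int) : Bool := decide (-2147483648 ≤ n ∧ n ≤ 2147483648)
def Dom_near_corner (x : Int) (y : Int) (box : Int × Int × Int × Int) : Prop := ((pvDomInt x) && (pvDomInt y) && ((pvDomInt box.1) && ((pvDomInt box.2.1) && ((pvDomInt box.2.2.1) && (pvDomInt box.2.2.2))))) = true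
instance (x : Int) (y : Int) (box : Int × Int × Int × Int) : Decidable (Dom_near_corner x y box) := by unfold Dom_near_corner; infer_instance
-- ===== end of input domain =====

-- B resolves each axis independently (nearby horizontal edge, nearby vertical edge) and
-- composes the corner name, instead of scanning a dict of four corner points (objective: simpler).

def CORNER_TOL : Int := 10

-- ===== PORT A =====
-- loop over the dict's items (insertion order) with early return
def near_corner_loop (x y : Int) : List (String × (Int × Int)) → Option String
  | [] => none
  | (name, (cx, cy)) :: rest =>
      if (x - cx).natAbs < CORNER_TOL.toNat ∧ (y - cy).natAbs < CORNER_TOL.toNat then some name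
      else near_corner_loop x y rest

def near_corner (x : Int) (y : Int) (box : Int × Int × Int × Int) : Option String :=
  let x1 := box.1; let y1 := box.2.1; let x2 := box.2.2.1; let y2 := box.2.2.2
  let corners : List (String × (Int × Int)) :=
    [("tl", (x1, y1)), ("tr", (x2, y1)), ("bl", (x1, y2)), ("br", (x2, y2))]
  near_corner_loop x y corners

-- ===== PORT B =====
def near_corner_alt (x : Int) (y : Int) (box : Int × Int × Int × Int) : Option String :=
  let x1 := box.1; let y1 := box.2.1; let x2 := box.2.2.1; let y2 := box.2.2.2
  let h : Option String :=
    if (x - x1).natAbs < CORNER_TOL.toNat then some "l"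
    else if (x - x2).natAbs < CORNER_TOL.toNat then some "r" else none
  let v : Option String :=
    if (y - y1).natAbs < CORNER_TOL.toNat then some "t"
    else if (y - y2).natAbs < CORNER_TOL.toNat then some "b" else none
  match h, v with
  | some hs, some vs => some (vs ++ hs)
  | _, _ => none

-- ===== PRECONDITION & SPEC =====
def Spec_near_corner (x : Int) (y : Int) (box : Int × Int × Int × Int) (out : Option String) : Prop := out = near_corner_alt x y box
instance (x : Int) (y : Int) (box : Int × Int × Int × Int) (out : Option String) : Decidable (Spec_near_corner x y box out) := by unfold Spec_near_corner; infer_instance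

-- ===== CLAIM (what is proved, stated in full; the proofs are below) =====
def Claim_equal_near_corner : Prop := ∀ (x : Int) (y : Int) (box : Int × Int × Int × Int), Dom_near_corner x y box → Spec_near_corner x y box (near_corner x y box)

-- ===== LEMMAS AND PROOFS =====

-- ===== VERDICT (by name: the statement is the Claim_ definition above) =====
theorem near_corner_spec : Claim_equal_near_corner := by
  intro x y box _
  obtain ⟨x1, y1, x2, y2⟩ := box
  unfold Spec_near_corner
  simp only [near_corner, near_corner_alt, near_corner_loop]
  split_ifs <;> simp_all
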